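-- pv_equiv track=rewrite | github.com/aadhityasw/Competitive-Programs | questions/q267_maximum_sum_triplets/code.py | solve
-- ===== SOURCE A (Python) =====
-- def solve(A):
--     n = len(A)
--     right_max = [-1]*n
--     maxi = A[-1]
--
--     for i in reversed(range(n-1)):
--         right_max[i] = maxi
--         maxi = max(maxi, A[i])
--
--     sk = []
--     c = 0
--     for i in range(n):
--         if sk:
--             while sk and sk[-1]>=right_max[i]:
--                 sk.pop()
--             while sk and sk[-1] < A[i] and A[i]<right_max[i]:
--                 c = max(c , sk[-1] + A[i] + right_max[i])
--                 sk.pop()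
--         sk.append(A[i])
--     return c
-- ===== SOURCE B (Python) =====
-- def solve(A):
--     c = 0
--     for j in range(len(A)):
--         left = [x for x in A[:j] if x < A[j]]
--         right = [x for x in A[j+1:] if x > A[j]]
--         if left and right:
--             c = max(c, max(left) + A[j] + max(right))
--     return c
-- ===== Notes on version B (the rewrite author's own statement) =====
-- stated objective: simpler
-- what changed: Replaced the suffix-max array plus monotonic-stack scan with a direct per-middle search: for each middle element take the largest smaller element on its left and the largest larger element on its right.
import Mathlib
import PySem

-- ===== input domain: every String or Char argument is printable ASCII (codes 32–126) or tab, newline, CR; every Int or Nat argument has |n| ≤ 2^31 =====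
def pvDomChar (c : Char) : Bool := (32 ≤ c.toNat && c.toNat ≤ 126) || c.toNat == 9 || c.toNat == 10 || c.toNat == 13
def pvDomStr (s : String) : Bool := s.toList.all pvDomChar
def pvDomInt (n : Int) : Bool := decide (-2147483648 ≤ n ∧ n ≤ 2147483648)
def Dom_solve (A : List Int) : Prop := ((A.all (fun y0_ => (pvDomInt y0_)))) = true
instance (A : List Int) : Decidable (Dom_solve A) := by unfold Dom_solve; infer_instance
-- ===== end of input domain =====

-- B replaces A's suffix-max + monotonic-stack scan by a direct per-middle brute-force search (simpler, O(n^2)); return values agree on every nonempty list.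

-- ===== PORT A =====
-- Stacks are represented top-at-head (Python's sk[-1] is the head here).
-- while sk and sk[-1] >= right_max[i]: sk.pop()
def popGE (sk : List Int) (rmi : Int) : List Int :=
  match sk with
  | [] => []
  | x :: rest => if rmi ≤ x then popGE rest rmi else x :: rest

-- while sk and sk[-1] < A[i] and A[i] < right_max[i]: c = max(c, sk[-1]+A[i]+right_max[i]); sk.pop()
def popLT (sk : List Int) (ai rmi c : Int) : List Int × Int :=
  match sk with
  | [] => ([], c)
  | x :: rest => if x < ai ∧ ai < rmi then popLT rest ai rmi (max c (x + ai + rmi)) else (x :: rest, c)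

def solve (A : List Int) : Int :=
  match PySem.List.pyGet? A (-1) with
  | none => 0   -- unreachable: Python raises IndexError here; excluded by Pre_solve
  | some last =>
    let n : Int := (A.length : Int)
    -- for i in reversed(range(n-1)): right_max[i] = maxi; maxi = max(maxi, A[i])
    -- (i is a nonnegative in-range index, so .set i.toNat / pyGetD are exact here)
    let p1 := ((PySem.List.pyRange 0 (n - 1) 1).reverse).foldl
      (fun (st : List Int × Int) i =>
        (st.1.set i.toNat st.2, max st.2 (PySem.List.pyGetD A i 0)))
      (List.replicate A.length (-1), last)
    let rm := p1.1
    -- for i in range(n): if sk: <the two while loops>; sk.append(A[i])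
    let p2 := (PySem.List.pyRange 0 n 1).foldl
      (fun (st : List Int × Int) i =>
        let ai := PySem.List.pyGetD A i 0
        let rmi := PySem.List.pyGetD rm i 0
        let sc := if st.1 = [] then (st.1, st.2) else popLT (popGE st.1 rmi) ai rmi st.2
        (ai :: sc.1, sc.2))
      ([], 0)
    p2.2

-- ===== PORT B =====
def solve_alt (A : List Int) : Int :=
  (PySem.List.pyRange 0 (A.length : Int) 1).foldl
    (fun c j =>
      let aj := PySem.List.pyGetD A j 0
      let left := (PySem.List.slice A none (some j)).filter (fun x => x < aj)
      let right := (PySem.List.slice A (some (j + 1)) none).filter (fun x => aj < x)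
      match left.max?, right.max? with
      | some bl, some br => max c (bl + aj + br)
      | _, _ => c)
    0

-- ===== PRECONDITION & SPEC =====
-- Pre_solve excludes only the empty list, on which the Python A raises IndexError (A[-1]).
def Pre_solve (A : List Int) : Prop := A ≠ []
instance (A : List Int) : Decidable (Pre_solve A) := by unfold Pre_solve; infer_instance
def pvWitness_solve : List Int := ([1, 2, 3] : List Int)

def Spec_solve (A : List Int) (out : Int) : Prop := out = solve_alt A
instance (A : List Int) (out : Int) : Decidable (Spec_solve A out) := by unfold Spec_solve; infer_instance

-- ===== CLAIM (what is proved, stated in full; the proofs are below) =====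
def Claim_equal_solve : Prop := ∀ (A : List Int), Dom_solve A → Pre_solve A → Spec_solve A (solve A)

-- ===== LEMMAS AND PROOFS =====

-- value of A at a Nat index
def av (A : List Int) (i : Nat) : Int := A.getD i 0

-- genuine maximum of a list (0 is irrelevant: only used nonempty)
def mx : List Int → Int
  | [] => 0
  | x :: xs => xs.foldl max x

-- right_max[j] as the Python first loop leaves it
def Rv (A : List Int) (j : Nat) : Int := if j + 1 < A.length then mx (A.drop (j + 1)) else -1

-- the pairs (left index, middle index) the algorithms care about
def validP (A : List Int) (i j : Nat) : Prop :=
  i < j ∧ j + 1 < A.length ∧ av A i < av A j ∧ av A j < Rv A j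

-- one step of A's main loop, in Nat-index form
def stepN (A : List Int) (st : List Int × Int) (t : Nat) : List Int × Int :=
  let sc := popLT (popGE st.1 (Rv A t)) (av A t) (Rv A t) st.2
  (av A t :: sc.1, sc.2)

def loopState (A : List Int) (t : Nat) : List Int × Int :=
  (List.range t).foldl (stepN A) ([], 0)

-- the invariant carried through A's main loop
def InvA (A : List Int) (t : Nat) (st : List Int × Int) : Prop :=
  (∀ x ∈ st.1, ∃ i, i < t ∧ av A i = x) ∧
  0 ≤ st.2 ∧
  (st.2 = 0 ∨ ∃ i j, validP A i j ∧ st.2 = av A i + av A j + Rv A j) ∧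
  (∀ i j, validP A i j → j < t → av A i + av A j + Rv A j ≤ st.2) ∧
  (∀ i j, validP A i j → i < t → t ≤ j →
    av A i + av A j + Rv A j ≤ st.2 ∨
    ∃ P Q x rest, st.1 = P ++ Q ++ x :: rest ∧ (∀ p ∈ P, Rv A t ≤ p) ∧
      (∀ q ∈ Q, q < av A j) ∧ av A i ≤ x ∧ x < av A j)

-- ---- generic foldl-max lemmas ----
theorem foldl_max_ge_init (a : Int) (l : List Int) : a ≤ l.foldl max a := by
  induction l generalizing a with
  | nil => simp
  | cons x xs ih => exact le_trans (le_max_left a x) (ih (max a x))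
theorem foldl_max_ge_mem (a y : Int) (l : List Int) (h : y ∈ l) : y ≤ l.foldl max a := by
  induction l generalizing a with
  | nil => simp at h
  | cons x xs ih =>
    rcases List.mem_cons.mp h with h | h
    · subst h; exact le_trans (le_max_right a y) (foldl_max_ge_init _ xs)
    · exact ih (max a x) h
theorem foldl_max_mem (a : Int) (l : List Int) : l.foldl max a = a ∨ l.foldl max a ∈ l := by
  induction l generalizing a with
  | nil => left; rfl
  | cons x xs ih =>
    rcases ih (max a x) with h | h
    · rcases max_choice a x with hm | hm
      · left; rw [List.foldl_cons, h, hm]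
      · right; rw [List.foldl_cons, h, hm]; exact List.mem_cons_self
    · right; exact List.mem_cons_of_mem _ h
theorem foldl_max_max (a b : Int) (l : List Int) : l.foldl max (max a b) = max a (l.foldl max b) := by
  induction l generalizing b with
  | nil => rfl
  | cons x xs ih => rw [List.foldl_cons, List.foldl_cons, max_assoc, ih (max b x)]

theorem mx_ge_mem (l : List Int) (y : Int) (h : y ∈ l) : y ≤ mx l := by
  match l with
  | [] => simp at h
  | x :: xs =>
    rcases List.mem_cons.mp h with h | h
    · subst h; exact foldl_max_ge_init y xs
    · exact foldl_max_ge_mem x y xs h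
theorem mx_mem (x : Int) (xs : List Int) : mx (x :: xs) ∈ x :: xs := by
  rcases foldl_max_mem x xs with h | h
  · rw [mx, h]; exact List.mem_cons_self
  · exact List.mem_cons_of_mem _ h
theorem mx_cons (x : Int) (xs : List Int) (h : xs ≠ []) : mx (x :: xs) = max x (mx xs) := by
  match xs with
  | [] => exact absurd rfl h
  | y :: ys => rw [mx, mx, List.foldl_cons, ← foldl_max_max]

-- ---- Rv lemmas ----
theorem Rv_mem (A : List Int) (j : Nat) (hj : j + 1 < A.length) : Rv A j ∈ A.drop (j + 1) := by
  have hne : A.drop (j + 1) ≠ [] := by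
    intro hnil
    have := List.length_drop (l := A) (i := j + 1)
    rw [hnil] at this; simp at this; omega
  unfold Rv
  rw [if_pos hj]
  match hdt : A.drop (j + 1) with
  | [] => exact absurd hdt hne
  | x :: xs => exact mx_mem x xs

theorem Rv_antitone (A : List Int) (t j : Nat) (htj : t ≤ j) (hj : j + 1 < A.length) :
    Rv A j ≤ Rv A t := by
  have ht : t + 1 < A.length := by omega
  have hmem : Rv A j ∈ A.drop (t + 1) := by
    have h1 : Rv A j ∈ A.drop (j + 1) := Rv_mem A j hj
    have h2 : A.drop (j + 1) = (A.drop (t + 1)).drop (j - t) := by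
      rw [List.drop_drop]; congr 1; omega
    rw [h2] at h1
    exact List.mem_of_mem_drop h1
  unfold Rv
  rw [if_pos ht]
  have hne : A.drop (t + 1) ≠ [] := by
    intro hnil
    rw [hnil] at hmem; simp at hmem
  match hdt : A.drop (t + 1) with
  | [] => exact absurd hdt hne
  | x :: xs =>
    rw [hdt] at hmem
    exact mx_ge_mem _ _ hmem
theorem mem_le_Rv (A : List Int) (j : Nat) (hj : j + 1 < A.length) (x : Int)
    (h : x ∈ A.drop (j + 1)) : x ≤ Rv A j := by
  unfold Rv
  rw [if_pos hj]
  exact mx_ge_mem _ _ h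

-- ---- popGE lemmas ----
theorem popGE_subset (sk : List Int) (r : Int) : ∀ y ∈ popGE sk r, y ∈ sk := by
  induction sk with
  | nil => intro y hy; simp [popGE] at hy
  | cons x rest ih =>
    intro y hy
    rw [popGE] at hy
    split at hy
    · exact List.mem_cons_of_mem _ (ih y hy)
    · exact hy
theorem popGE_append_ge (P l : List Int) (r : Int) (h : ∀ p ∈ P, r ≤ p) :
    popGE (P ++ l) r = popGE l r := by
  induction P with
  | nil => rfl
  | cons p P ih =>
    rw [List.cons_append, popGE, if_pos (h p List.mem_cons_self)]
    exact ih (fun q hq => h q (List.mem_cons_of_mem _ hq))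
theorem popGE_below (ys rest : List Int) (x r : Int) (hx : x < r) :
    ∃ ys', popGE (ys ++ x :: rest) r = ys' ++ x :: rest ∧ ∀ q ∈ ys', q ∈ ys := by
  induction ys with
  | nil =>
    refine ⟨[], ?_, by simp⟩
    rw [List.nil_append, popGE, if_neg (by omega)]
  | cons y ys ih =>
    by_cases hy : r ≤ y
    · obtain ⟨ys', h1, h2⟩ := ih
      refine ⟨ys', ?_, fun q hq => List.mem_cons_of_mem _ (h2 q hq)⟩
      rw [List.cons_append, popGE, if_pos hy, h1]
    · refine ⟨y :: ys, ?_, fun q hq => hq⟩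
      rw [List.cons_append, popGE, if_neg hy]

-- ---- popLT lemmas ----
theorem popLT_le (sk : List Int) (ai rmi c : Int) : c ≤ (popLT sk ai rmi c).2 := by
  induction sk generalizing c with
  | nil => exact le_refl c
  | cons x rest ih =>
    rw [popLT]
    split
    · exact le_trans (le_max_left _ _) (ih _)
    · exact le_refl c
theorem popLT_subset (sk : List Int) (ai rmi c : Int) : ∀ y ∈ (popLT sk ai rmi c).1, y ∈ sk := by
  induction sk generalizing c with
  | nil => intro y hy; simp [popLT] at hy
  | cons x rest ih =>
    intro y hy
    rw [popLT] at hy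
    split at hy
    · exact List.mem_cons_of_mem _ (ih _ y hy)
    · exact hy
theorem popLT_c_cases (sk : List Int) (ai rmi c : Int) :
    (popLT sk ai rmi c).2 = c ∨
    ∃ p ∈ sk, p < ai ∧ ai < rmi ∧ (popLT sk ai rmi c).2 = p + ai + rmi := by
  induction sk generalizing c with
  | nil => left; rfl
  | cons x rest ih =>
    rw [popLT]
    split
    · rename_i hcond
      rcases ih (max c (x + ai + rmi)) with h | ⟨p, hp, h1, h2, h3⟩
      · rcases max_choice c (x + ai + rmi) with hm | hm
        · left; rw [h, hm]
        · right; exact ⟨x, List.mem_cons_self, hcond.1, hcond.2, by rw [h, hm]⟩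
      · right; exact ⟨p, List.mem_cons_of_mem _ hp, h1, h2, h3⟩
    · left; rfl
theorem popLT_reach (Q rest : List Int) (x ai rmi c : Int)
    (hQ : ∀ q ∈ Q, q < ai) (hx : x < ai) (hr : ai < rmi) :
    x + ai + rmi ≤ (popLT (Q ++ x :: rest) ai rmi c).2 := by
  induction Q generalizing c with
  | nil =>
    rw [List.nil_append, popLT, if_pos ⟨hx, hr⟩]
    exact le_trans (le_max_right c _) (popLT_le rest ai rmi _)
  | cons q Q ih =>
    rw [List.cons_append, popLT, if_pos ⟨hQ q List.mem_cons_self, hr⟩]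
    exact ih _ (fun p hp => hQ p (List.mem_cons_of_mem _ hp))
theorem popLT_split (Q rest : List Int) (x ai rmi c : Int) :
    (∃ Q2, (popLT (Q ++ x :: rest) ai rmi c).1 = Q2 ++ x :: rest ∧ ∀ q ∈ Q2, q ∈ Q) ∨
    x + ai + rmi ≤ (popLT (Q ++ x :: rest) ai rmi c).2 := by
  induction Q generalizing c with
  | nil =>
    rw [List.nil_append, popLT]
    split
    · rename_i hcond
      right
      exact le_trans (le_max_right c _) (popLT_le rest ai rmi _)
    · left; exact ⟨[], rfl, by simp⟩
  | cons q Q ih =>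
    rw [List.cons_append, popLT]
    split
    · rcases ih (max c (q + ai + rmi)) with ⟨Q2, h1, h2⟩ | h
      · left; exact ⟨Q2, h1, fun p hp => List.mem_cons_of_mem _ (h2 p hp)⟩
      · right; exact h
    · left; exact ⟨q :: Q, rfl, fun p hp => hp⟩

theorem popLT_stop (Q rest : List Int) (x ai rmi c : Int) (h : ¬(x < ai ∧ ai < rmi)) :
    ∃ Q2, (popLT (Q ++ x :: rest) ai rmi c).1 = Q2 ++ x :: rest ∧ ∀ q ∈ Q2, q ∈ Q := by
  induction Q generalizing c with
  | nil =>
    rw [List.nil_append, popLT, if_neg h]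
    exact ⟨[], rfl, by simp⟩
  | cons q Q ih =>
    rw [List.cons_append, popLT]
    split
    · obtain ⟨Q2, h1, h2⟩ := ih _
      exact ⟨Q2, h1, fun p hp => List.mem_cons_of_mem _ (h2 p hp)⟩
    · exact ⟨q :: Q, rfl, fun p hp => hp⟩

-- ---- the invariant ----
theorem inv_init (A : List Int) : InvA A 0 ([], 0) := by
  refine ⟨?_, le_refl 0, Or.inl rfl, ?_, ?_⟩
  · intro x hx; simp at hx
  · intro i j _ hj; omega
  · intro i j _ hi _; omega
theorem inv_step (A : List Int) (t : Nat) (st : List Int × Int)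
    (h : InvA A t st) : InvA A (t + 1) (stepN A st t) := by
  obtain ⟨hU1, hc0, hU2, hK, hJ⟩ := h
  have hc2le : st.2 ≤ (popLT (popGE st.1 (Rv A t)) (av A t) (Rv A t) st.2).2 :=
    popLT_le _ _ _ _
  refine ⟨?_, le_trans hc0 hc2le, ?_, ?_, ?_⟩
  · -- U1
    intro x hx
    rcases List.mem_cons.mp hx with hx | hx
    · exact ⟨t, Nat.lt_succ_self t, hx.symm⟩
    · obtain ⟨i, hi, he⟩ := hU1 x (popGE_subset _ _ x (popLT_subset _ _ _ _ x hx))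
      exact ⟨i, Nat.lt_succ_of_lt hi, he⟩
  · -- U2
    rcases popLT_c_cases (popGE st.1 (Rv A t)) (av A t) (Rv A t) st.2 with hcc | ⟨p, hp, h1, h2, h3⟩
    · rw [show (stepN A st t).2 = (popLT (popGE st.1 (Rv A t)) (av A t) (Rv A t) st.2).2 from rfl, hcc]
      exact hU2
    · obtain ⟨i', hi', he'⟩ := hU1 p (popGE_subset _ _ p hp)
      by_cases hlen : t + 1 < A.length
      · exact Or.inr ⟨i', t, ⟨by omega, hlen, by rw [he']; exact h1, h2⟩,
          by rw [show (stepN A st t).2 = (popLT (popGE st.1 (Rv A t)) (av A t) (Rv A t) st.2).2 from rfl, h3, he']⟩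
      · exfalso
        have hrm : Rv A t = -1 := by unfold Rv; rw [if_neg hlen]
        rw [hrm] at h2
        have : (popLT (popGE st.1 (Rv A t)) (av A t) (Rv A t) st.2).2 = p + av A t + Rv A t := h3
        rw [hrm] at this
        omega
  · -- K
    intro i j hv hj
    rcases Nat.lt_or_ge j t with hjt | hjt
    · exact le_trans (hK i j hv hjt) hc2le
    · have hjt : j = t := by omega
      subst hjt
      rcases hJ i j hv hv.1 (le_refl j) with hle | ⟨P, Q, x, rest, hsk, hP, hQ, hxi, hxj⟩
      · exact le_trans hle hc2le
      · have hxr : x < Rv A j := lt_trans hxj hv.2.2.2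
        have hpop : popGE st.1 (Rv A j) = popGE (Q ++ x :: rest) (Rv A j) := by
          rw [hsk, show P ++ Q ++ x :: rest = P ++ (Q ++ x :: rest) by simp, popGE_append_ge P _ _ hP]
        obtain ⟨Q1, hQ1eq, hQ1sub⟩ := popGE_below Q rest x (Rv A j) hxr
        have hreach : x + av A j + Rv A j ≤ (popLT (popGE st.1 (Rv A j)) (av A j) (Rv A j) st.2).2 := by
          rw [hpop, hQ1eq]
          exact popLT_reach Q1 rest x _ _ _ (fun q hq => hQ q (hQ1sub q hq)) hxj hv.2.2.2
        calc av A i + av A j + Rv A j ≤ x + av A j + Rv A j := by omega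
          _ ≤ _ := hreach
  · -- J
    intro i j hv hi hj
    rcases Nat.lt_or_ge i t with hit | hit
    · -- i < t : use the old J
      have htj : t ≤ j := by omega
      have hj1 : j + 1 < A.length := hv.2.1
      have hRtj : Rv A j ≤ Rv A t := Rv_antitone A t j htj hj1
      rcases hJ i j hv hit htj with hle | ⟨P, Q, x, rest, hsk, hP, hQ, hxi, hxj⟩
      · exact Or.inl (le_trans hle hc2le)
      · have hxrj : x < Rv A j := lt_trans hxj hv.2.2.2
        have hxrt : x < Rv A t := lt_of_lt_of_le hxrj hRtj
        have hpop : popGE st.1 (Rv A t) = popGE (Q ++ x :: rest) (Rv A t) := by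
          rw [hsk, show P ++ Q ++ x :: rest = P ++ (Q ++ x :: rest) by simp, popGE_append_ge P _ _ hP]
        obtain ⟨Q1, hQ1eq, hQ1sub⟩ := popGE_below Q rest x (Rv A t) hxrt
        have hQ1j : ∀ q ∈ Q1, q < av A j := fun q hq => hQ q (hQ1sub q hq)
        rcases lt_or_ge (av A t) (av A j) with hC1 | hC2
        · -- C1 : A[t] < A[j]
          by_cases hxai : x < av A t
          · rcases popLT_split Q1 rest x (av A t) (Rv A t) st.2 with ⟨Q2, h1, h2⟩ | hrec
            · refine Or.inr ⟨[], av A t :: Q2, x, rest, ?_, by simp, ?_, hxi, hxj⟩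
              · show av A t :: _ = _
                rw [hpop, hQ1eq, h1]; rfl
              · intro q hq
                rcases List.mem_cons.mp hq with hq | hq
                · rw [hq]; exact hC1
                · exact hQ1j q (h2 q hq)
            · rw [← hQ1eq, ← hpop] at hrec
              refine Or.inr ⟨[], [], av A t, (popLT (popGE st.1 (Rv A t)) (av A t) (Rv A t) st.2).1, by simp [stepN], by simp, by simp, by omega, hC1⟩
          · have hstop := popLT_stop Q1 rest x (av A t) (Rv A t) st.2 (by intro hh; exact hxai hh.1)
            obtain ⟨Q2, h1, h2⟩ := hstop
            refine Or.inr ⟨[], av A t :: Q2, x, rest, ?_, by simp, ?_, hxi, hxj⟩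
            · show av A t :: _ = _
              rw [hpop, hQ1eq, h1]; rfl
            · intro q hq
              rcases List.mem_cons.mp hq with hq | hq
              · rw [hq]; exact hC1
              · exact hQ1j q (h2 q hq)
        · -- C2 : A[j] ≤ A[t]
          rcases lt_or_ge (av A t) (Rv A t) with hC2a | hC2b
          · -- records x + A[t] + Rv t, which dominates
            have hreach : x + av A t + Rv A t ≤ (popLT (popGE st.1 (Rv A t)) (av A t) (Rv A t) st.2).2 := by
              rw [hpop, hQ1eq]
              exact popLT_reach Q1 rest x _ _ _ (fun q hq => lt_of_lt_of_le (hQ1j q hq) hC2) (lt_of_lt_of_le hxj hC2) hC2a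
            exact Or.inl (le_trans (by omega) hreach)
          · -- A[t] ≥ Rv t : A[t] goes into the P-class
            have hstop := popLT_stop Q1 rest x (av A t) (Rv A t) st.2 (by intro hh; omega)
            obtain ⟨Q2, h1, h2⟩ := hstop
            refine Or.inr ⟨[av A t], Q2, x, rest, ?_, ?_, fun q hq => hQ1j q (h2 q hq), hxi, hxj⟩
            · show av A t :: _ = _
              rw [hpop, hQ1eq, h1]; rfl
            · intro p hp
              rcases List.mem_cons.mp hp with hp | hp
              · subst hp
                have ht2 : t + 1 + 1 < A.length := by omega
                have := Rv_antitone A t (t + 1) (by omega) (by omega)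
                omega
              · simp at hp
    · -- i = t : the freshly pushed A[t] is the witness
      have hit : i = t := by omega
      subst hit
      exact Or.inr ⟨[], [], av A i, (popLT (popGE st.1 (Rv A i)) (av A i) (Rv A i) st.2).1,
        by simp [stepN], by simp, by simp, le_refl _, hv.2.2.1⟩
theorem inv_loop (A : List Int) (t : Nat) : InvA A t (loopState A t) := by
  induction t with
  | zero => exact inv_init A
  | succ t ih =>
    have : loopState A (t + 1) = stepN A (loopState A t) t := by
      unfold loopState
      rw [List.range_succ, List.foldl_append, List.foldl_cons, List.foldl_nil]
    rw [this]
    exact inv_step A t (loopState A t) ih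

-- ---- list-access helper lemmas ----
theorem set_getD_same (l : List Int) (i : Nat) (v d : Int) (h : i < l.length) :
    (l.set i v).getD i d = v := by
  simp [List.getD_eq_getElem?_getD, h]

theorem set_getD_other (l : List Int) (i j : Nat) (v d : Int) (h : i ≠ j) :
    (l.set i v).getD j d = l.getD j d := by
  simp [List.getD_eq_getElem?_getD, h]

theorem mx_drop (A : List Int) (k : Nat) (h : k + 1 < A.length) :
    mx (A.drop k) = max (av A k) (mx (A.drop (k + 1))) := by
  rw [List.drop_eq_getElem_cons (by omega : k < A.length),
    mx_cons _ _ (by intro hnil; have := List.length_drop (l := A) (i := k + 1); rw [hnil] at this; simp at this; omega)]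
  congr 1
  exact (List.getD_eq_getElem A 0 (by omega : k < A.length)).symm

theorem drop_length_sub_one (A : List Int) (h : A ≠ []) :
    A.drop (A.length - 1) = [A.getLast h] := by
  have hl : A.length - 1 < A.length := by have := List.length_pos_of_ne_nil h; omega
  rw [List.drop_eq_getElem_cons hl, show A.length - 1 + 1 = A.length by omega]
  simp [List.getLast_eq_getElem]

-- ---- the first (right_max) loop of A ----
theorem rmAux (A : List Int) (k : Nat) (hk : k < A.length) :
    ∀ st : List Int × Int, st.1.length = A.length → st.2 = mx (A.drop k) →
    ((PySem.List.pyRange 0 (k : Int) 1).reverse.foldl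
        (fun (st : List Int × Int) i =>
          (st.1.set i.toNat st.2, max st.2 (PySem.List.pyGetD A i 0))) st).1.length = A.length ∧
    (∀ i : Nat, i < k →
      ((PySem.List.pyRange 0 (k : Int) 1).reverse.foldl
        (fun (st : List Int × Int) i =>
          (st.1.set i.toNat st.2, max st.2 (PySem.List.pyGetD A i 0))) st).1.getD i 0 = Rv A i) ∧
    (∀ i : Nat, k ≤ i →
      ((PySem.List.pyRange 0 (k : Int) 1).reverse.foldl
        (fun (st : List Int × Int) i =>
          (st.1.set i.toNat st.2, max st.2 (PySem.List.pyGetD A i 0))) st).1.getD i 0 = st.1.getD i 0) := by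
  induction k with
  | zero =>
    intro st h1 h2
    rw [PySem.List.pyRange_one_eq_nil (by omega)]
    exact ⟨h1, fun i hi => absurd hi (by omega), fun i _ => rfl⟩
  | succ k ih =>
    intro st h1 h2
    have hcast : ((k + 1 : Nat) : Int) = (k : Int) + 1 := by push_cast; ring
    rw [hcast, PySem.List.pyRange_one_succ_right (by positivity), List.reverse_append,
      List.reverse_singleton, List.singleton_append, List.foldl_cons]
    have hset : (st.1.set (k : Int).toNat st.2, max st.2 (PySem.List.pyGetD A (k : Int) 0)) =
        (st.1.set k (mx (A.drop (k + 1))), mx (A.drop k)) := by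
      rw [h2, Prod.mk.injEq]
      refine ⟨by simp, ?_⟩
      rw [PySem.List.pyGetD_natCast, mx_drop A k hk]
      exact max_comm _ _
    rw [hset]
    obtain ⟨ih1, ih2, ih3⟩ := ih (by omega)
      (st.1.set k (mx (A.drop (k + 1))), mx (A.drop k))
      (by simpa using h1) rfl
    refine ⟨ih1, ?_, ?_⟩
    · intro i hi
      rcases Nat.lt_or_ge i k with h | h
      · exact ih2 i h
      · have hik : i = k := by omega
        subst hik
        rw [ih3 i (le_refl i)]
        show (st.1.set i (mx (A.drop (i + 1)))).getD i 0 = Rv A i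
        rw [set_getD_same _ _ _ _ (by omega)]
        unfold Rv
        rw [if_pos (by omega)]
    · intro i hi
      rw [ih3 i (by omega)]
      exact set_getD_other _ _ _ _ _ (by omega)

-- ---- bridge: port A equals the Nat-form loop ----
theorem solve_eq_loop (A : List Int) (h : A ≠ []) : solve A = (loopState A A.length).2 := by
  have hn : 0 < A.length := List.length_pos_of_ne_nil h
  unfold solve
  rw [PySem.List.pyGet?_neg_one, List.getLast?_eq_getLast_of_ne_nil h]
  have hcast : (A.length : Int) - 1 = ((A.length - 1 : Nat) : Int) := by push_cast [hn]; ring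
  have hlast : A.getLast h = mx (A.drop (A.length - 1)) := by
    rw [drop_length_sub_one A h]; rfl
  obtain ⟨hrm1, hrm2, hrm3⟩ := rmAux A (A.length - 1) (by omega)
    (List.replicate A.length (-1), A.getLast h) (by simp) hlast
  show ((PySem.List.pyRange 0 (A.length : Int) 1).foldl
      (fun (st : List Int × Int) i =>
        let ai := PySem.List.pyGetD A i 0
        let rmi := PySem.List.pyGetD
          (((PySem.List.pyRange 0 ((A.length : Int) - 1) 1).reverse.foldl
            (fun (st : List Int × Int) i => (st.1.set i.toNat st.2, max st.2 (PySem.List.pyGetD A i 0)))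
            (List.replicate A.length (-1), A.getLast h)).1) i 0
        let sc := if st.1 = [] then (st.1, st.2) else popLT (popGE st.1 rmi) ai rmi st.2
        (ai :: sc.1, sc.2)) ([], 0)).2 = (loopState A A.length).2
  rw [hcast]
  set rm := ((PySem.List.pyRange 0 ((A.length - 1 : Nat) : Int) 1).reverse.foldl
      (fun (st : List Int × Int) i =>
        (st.1.set i.toNat st.2, max st.2 (PySem.List.pyGetD A i 0)))
      (List.replicate A.length (-1), A.getLast h)).1 with hrmdef
  have hrm : ∀ i : Nat, i < A.length → rm.getD i 0 = Rv A i := by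
    intro i hi
    rcases Nat.lt_or_ge i (A.length - 1) with hcase | hcase
    · exact hrm2 i hcase
    · have hie : i = A.length - 1 := by omega
      have hrep : (List.replicate A.length (-1 : Int)).getD (A.length - 1) 0 = -1 := by
        have h1 : A.length - 1 < A.length := by omega
        simp [List.getD_eq_getElem?_getD, h1]
      rw [hie, hrm3 (A.length - 1) (le_refl _)]
      show (List.replicate A.length (-1 : Int)).getD (A.length - 1) 0 = Rv A (A.length - 1)
      rw [hrep]
      unfold Rv
      rw [if_neg (by omega)]
  -- now the main loop
  rw [PySem.List.pyRange_zero_natCast, List.foldl_map]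
  unfold loopState
  have hcongr : ∀ (st : List Int × Int) (k : Nat), k ∈ List.range A.length →
      (fun (st : List Int × Int) (i : Int) =>
        let ai := PySem.List.pyGetD A i 0
        let rmi := PySem.List.pyGetD rm i 0
        let sc := if st.1 = [] then (st.1, st.2) else popLT (popGE st.1 rmi) ai rmi st.2
        (ai :: sc.1, sc.2)) st (k : Int) = stepN A st k := by
    intro st k hk
    have hklen : k < A.length := List.mem_range.mp hk
    show (PySem.List.pyGetD A (k : Int) 0 ::
        (if st.1 = [] then (st.1, st.2)
         else popLT (popGE st.1 (PySem.List.pyGetD rm (k : Int) 0)) (PySem.List.pyGetD A (k : Int) 0) (PySem.List.pyGetD rm (k : Int) 0) st.2).1,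
        (if st.1 = [] then (st.1, st.2)
         else popLT (popGE st.1 (PySem.List.pyGetD rm (k : Int) 0)) (PySem.List.pyGetD A (k : Int) 0) (PySem.List.pyGetD rm (k : Int) 0) st.2).2) = stepN A st k
    rw [PySem.List.pyGetD_natCast, PySem.List.pyGetD_natCast, hrm k hklen]
    by_cases hempty : st.1 = []
    · rw [if_pos hempty]
      unfold stepN
      rw [hempty]
      rfl
    · rw [if_neg hempty]
      rfl
  exact congrArg Prod.snd (PySem.List.foldl_congr_mem _ _ _ ([], 0) hcongr)

-- ---- facts about port B ----
def gB (A : List Int) (c : Int) (j : Nat) : Int :=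
  match ((A.take j).filter (fun x => x < av A j)).max?,
        ((A.drop (j + 1)).filter (fun x => av A j < x)).max? with
  | some bl, some br => max c (bl + av A j + br)
  | _, _ => c

theorem max?_eq_mx (l : List Int) (h : l ≠ []) : l.max? = some (mx l) := by
  match l with
  | [] => exact absurd rfl h
  | a :: as => rfl

theorem gB_mono (A : List Int) (c : Int) (j : Nat) : c ≤ gB A c j := by
  unfold gB
  split
  · exact le_max_left _ _
  · exact le_refl c

theorem foldl_gB_init_le (A : List Int) (c : Int) (l : List Nat) : c ≤ l.foldl (gB A) c := by
  induction l generalizing c with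
  | nil => exact le_refl c
  | cons x xs ih => exact le_trans (gB_mono A c x) (ih _)

theorem foldl_gB_contrib (A : List Int) (l : List Nat) (j : Nat) (hj : j ∈ l) (c bl br : Int)
    (h1 : ((A.take j).filter (fun x => x < av A j)).max? = some bl)
    (h2 : ((A.drop (j + 1)).filter (fun x => av A j < x)).max? = some br) :
    bl + av A j + br ≤ l.foldl (gB A) c := by
  induction l generalizing c with
  | nil => simp at hj
  | cons x xs ih =>
    rcases List.mem_cons.mp hj with hx | hx
    · subst hx
      have : gB A c j = max c (bl + av A j + br) := by
        unfold gB
        rw [h1, h2]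
      rw [List.foldl_cons, this]
      exact le_trans (le_max_right _ _) (foldl_gB_init_le A _ xs)
    · exact ih hx _

theorem foldl_gB_le_bound (A : List Int) (M : Int) (l : List Nat)
    (hM : ∀ j ∈ l, ∀ bl br : Int,
      ((A.take j).filter (fun x => x < av A j)).max? = some bl →
      ((A.drop (j + 1)).filter (fun x => av A j < x)).max? = some br →
      bl + av A j + br ≤ M)
    (c : Int) (hc : c ≤ M) : l.foldl (gB A) c ≤ M := by
  induction l generalizing c with
  | nil => exact hc
  | cons x xs ih =>
    rw [List.foldl_cons]
    refine ih (fun j hj => hM j (List.mem_cons_of_mem _ hj)) _ ?_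
    unfold gB
    split
    · rename_i bl br h1 h2
      exact max_le hc (hM x List.mem_cons_self bl br h1 h2)
    · exact hc

theorem solve_alt_eq (A : List Int) : solve_alt A = (List.range A.length).foldl (gB A) 0 := by
  unfold solve_alt
  rw [PySem.List.pyRange_zero_natCast, List.foldl_map]
  refine PySem.List.foldl_congr_mem _ _ _ 0 ?_
  intro c k hk
  show (let aj := PySem.List.pyGetD A (k : Int) 0
        let left := (PySem.List.slice A none (some (k : Int))).filter (fun x => x < aj)
        let right := (PySem.List.slice A (some ((k : Int) + 1)) none).filter (fun x => aj < x)
        match left.max?, right.max? with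
        | some bl, some br => max c (bl + aj + br)
        | _, _ => c) = gB A c k
  rw [show ((k : Int) + 1) = (((k + 1 : Nat)) : Int) by push_cast; ring]
  unfold gB
  rw [PySem.List.pyGetD_natCast, PySem.List.slice_to_natCast, PySem.List.slice_from_natCast]
  rfl

theorem solve_alt_nonneg (A : List Int) : 0 ≤ solve_alt A := by
  rw [solve_alt_eq]
  exact foldl_gB_init_le A 0 _
theorem solve_alt_ge (A : List Int) (i j : Nat) (h : validP A i j) :
    av A i + av A j + Rv A j ≤ solve_alt A := by
  obtain ⟨hij, hjlen, hav, hrv⟩ := h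
  have hilen : i < A.length := by omega
  have hmemL : av A i ∈ (A.take j).filter (fun x => x < av A j) := by
    rw [List.mem_filter]
    constructor
    · have : (A.take j)[i]'(by simp; omega) = A[i] := List.getElem_take
      rw [show av A i = A[i] from List.getD_eq_getElem A 0 hilen]
      exact this ▸ List.getElem_mem _
    · exact decide_eq_true hav
  have hmemR : Rv A j ∈ (A.drop (j + 1)).filter (fun x => av A j < x) := by
    rw [List.mem_filter]
    exact ⟨Rv_mem A j hjlen, decide_eq_true hrv⟩
  have hL := max?_eq_mx _ (List.ne_nil_of_mem hmemL)
  have hR := max?_eq_mx _ (List.ne_nil_of_mem hmemR)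
  rw [solve_alt_eq]
  calc av A i + av A j + Rv A j
      ≤ mx ((A.take j).filter (fun x => x < av A j)) + av A j
        + mx ((A.drop (j + 1)).filter (fun x => av A j < x)) := by
        have h1 := mx_ge_mem _ _ hmemL
        have h2 := mx_ge_mem _ _ hmemR
        omega
    _ ≤ _ := foldl_gB_contrib A _ j (List.mem_range.mpr (by omega)) 0 _ _ hL hR
theorem solve_alt_le (A : List Int) (M : Int) (h0 : 0 ≤ M)
    (h : ∀ i j, validP A i j → av A i + av A j + Rv A j ≤ M) : solve_alt A ≤ M := by
  rw [solve_alt_eq]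
  refine foldl_gB_le_bound A M _ ?_ 0 h0
  intro j hj bl br h1 h2
  have hjn : j < A.length := List.mem_range.mp hj
  have hLne : (A.take j).filter (fun x => x < av A j) ≠ [] := by
    intro hnil; rw [hnil] at h1; simp at h1
  have hRne : (A.drop (j + 1)).filter (fun x => av A j < x) ≠ [] := by
    intro hnil; rw [hnil] at h2; simp at h2
  rw [max?_eq_mx _ hLne] at h1
  rw [max?_eq_mx _ hRne] at h2
  have hblmem : bl ∈ (A.take j).filter (fun x => x < av A j) := by
    rw [← Option.some_inj.mp h1]
    match hmatch : (A.take j).filter (fun x => x < av A j) with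
    | [] => exact absurd hmatch hLne
    | y :: ys => exact mx_mem y ys
  have hbrmem : br ∈ (A.drop (j + 1)).filter (fun x => av A j < x) := by
    rw [← Option.some_inj.mp h2]
    match hmatch : (A.drop (j + 1)).filter (fun x => av A j < x) with
    | [] => exact absurd hmatch hRne
    | y :: ys => exact mx_mem y ys
  obtain ⟨hblmem', hbl_lt⟩ := List.mem_filter.mp hblmem
  obtain ⟨hbrmem', hbr_gt⟩ := List.mem_filter.mp hbrmem
  have hbl_lt : bl < av A j := of_decide_eq_true hbl_lt
  have hbr_gt : av A j < br := of_decide_eq_true hbr_gt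
  -- the right side is nonempty, so j + 1 < length
  have hjlen : j + 1 < A.length := by
    by_contra hcon
    have : A.drop (j + 1) = [] := List.drop_of_length_le (by omega)
    rw [this] at hbrmem'; simp at hbrmem'
  -- br equals Rv A j
  have hbr_le : br ≤ Rv A j := mem_le_Rv A j hjlen br hbrmem'
  have hrv_le : Rv A j ≤ br := by
    have hrvmem : Rv A j ∈ (A.drop (j + 1)).filter (fun x => av A j < x) := by
      rw [List.mem_filter]
      exact ⟨Rv_mem A j hjlen, decide_eq_true (by omega)⟩
    rw [show br = mx ((A.drop (j + 1)).filter (fun x => av A j < x)) from Option.some_inj.mp h2.symm]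
    exact mx_ge_mem _ _ hrvmem
  have hbr_eq : br = Rv A j := le_antisymm hbr_le hrv_le
  -- find the index of bl
  obtain ⟨k, hk, hkeq⟩ := List.mem_iff_getElem.mp hblmem'
  have hkj : k < j := by
    have := List.length_take_le j A
    have h2 := hk
    simp at h2
    omega
  have hklen : k < A.length := by
    have h2 := hk; simp at h2; omega
  have havk : av A k = bl := by
    rw [show av A k = A[k] from List.getD_eq_getElem A 0 hklen, ← hkeq]
    exact List.getElem_take.symm
  have hvalid : validP A k j := ⟨hkj, hjlen, by rw [havk]; exact hbl_lt, by omega⟩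
  have := h k j hvalid
  omega

-- ===== VERDICT (by name: the statement is the Claim_ definition above) =====
theorem solve_spec : Claim_equal_solve := by
  intro A _ hpre
  unfold Spec_solve
  rw [solve_eq_loop A hpre]
  have hinv := inv_loop A A.length
  obtain ⟨_, hc0, hcases, hK, _⟩ := hinv
  apply le_antisymm
  · rcases hcases with h | ⟨i, j, hv, he⟩
    · rw [h]; exact solve_alt_nonneg A
    · rw [he]; exact solve_alt_ge A i j hv
  · exact solve_alt_le A _ hc0 (fun i j hv => hK i j hv (Nat.lt_of_succ_lt hv.2.1))
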